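-- pv_equiv track=rewrite | github.com/ZeerakA/CS303E | Books.py | parseStringHelper
-- ===== SOURCE A (Python) =====
-- def parseStringHelper(st, parsed_st):
-- 	if len(st) == 0:
-- 		return parsed_st
-- 	elif st[0].isalpha():
-- 		parsed_st += st[0]
-- 	elif st[0] == "'" and len(st) > 1:
-- 		if st[1] == "s":
-- 			parsed_st += "  "
-- 		elif st[1].isalpha():
-- 			parsed_st += st[:2]
-- 		else:
-- 			parsed_st += "  "
-- 		return parseStringHelper(st[2:], parsed_st)
-- 	else:
-- 		parsed_st += " "
-- 	return parseStringHelper(st[1:], parsed_st)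
-- ===== SOURCE B (Python) =====
-- def parseStringHelper(st, parsed_st):
--     parts = [parsed_st]
--     i, n = 0, len(st)
--     while i < n:
--         c = st[i]
--         if c.isalpha():
--             parts.append(c)
--             i += 1
--         elif c == "'" and i + 1 < n:
--             d = st[i + 1]
--             parts.append(c + d if (d.isalpha() and d != "s") else "  ")
--             i += 2
--         else:
--             parts.append(" ")
--             i += 1
--     return "".join(parts)
-- ===== Notes on version B (the rewrite author's own statement) =====
-- stated objective: faster
-- what changed: Replaced A's tail recursion that copies a slice of the string and rebuilds the accumulator by concatenation at every step with a single linear index scan that appends pieces to a list buffer and joins it once at the end.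
import Mathlib
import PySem

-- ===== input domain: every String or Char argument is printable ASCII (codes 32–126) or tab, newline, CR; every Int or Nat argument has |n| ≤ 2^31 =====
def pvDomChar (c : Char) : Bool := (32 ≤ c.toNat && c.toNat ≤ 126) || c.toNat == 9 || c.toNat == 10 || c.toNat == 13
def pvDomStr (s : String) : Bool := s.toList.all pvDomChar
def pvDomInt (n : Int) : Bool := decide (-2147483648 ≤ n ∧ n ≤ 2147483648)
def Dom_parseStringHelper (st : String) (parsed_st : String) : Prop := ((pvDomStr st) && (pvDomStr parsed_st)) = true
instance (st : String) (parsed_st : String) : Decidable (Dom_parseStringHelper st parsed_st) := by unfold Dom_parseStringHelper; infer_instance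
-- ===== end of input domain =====

-- B replaces A's tail recursion on string slices (a fresh concatenation and slice copy per step)
-- by a single linear index scan collecting pieces in a buffer joined once at the end (objective: faster).

-- ===== PORT A =====
-- A's recursion, on the character list of st: st[0]/st[1] are the list heads,
-- st[1:]/st[2:] are the tails; parsed_st += x is acc ++ x.
def parseStringHelperAux : List Char → List Char → List Char
  | [], parsed => parsed
  | c :: rest, parsed =>
    if PySem.Chars.isalpha c then
      parseStringHelperAux rest (parsed ++ [c])
    else if c = '\'' ∧ rest ≠ [] then
      match rest with
      | d :: rest2 =>
        parseStringHelperAux rest2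
          (parsed ++ (if d = 's' then [' ', ' ']
                      else if PySem.Chars.isalpha d then [c, d]
                      else [' ', ' ']))
      | [] => parseStringHelperAux [] (parsed ++ [' '])
    else
      parseStringHelperAux rest (parsed ++ [' '])
termination_by l _ => l.length

def parseStringHelper (st : String) (parsed_st : String) : String :=
  String.ofList (parseStringHelperAux st.toList parsed_st.toList)

-- ===== PORT B =====
-- B's while loop: index i scans cs (i < n by the guard, so getD is exact for st[i]);
-- each piece is appended to `parts`, joined once at the end.
def parseStringHelperAltGo (cs : List Char) (n : Nat) (i : Nat) (parts : List String) : List String :=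
  if _h : i < n then
    let c := cs.getD i ' '
    if PySem.Chars.isalpha c then
      parseStringHelperAltGo cs n (i + 1) (parts ++ [String.ofList [c]])
    else if c = '\'' ∧ i + 1 < n then
      let d := cs.getD (i + 1) ' '
      parseStringHelperAltGo cs n (i + 2)
        (parts ++ [if PySem.Chars.isalpha d ∧ d ≠ 's' then String.ofList [c, d] else "  "])
    else
      parseStringHelperAltGo cs n (i + 1) (parts ++ [" "])
  else parts
termination_by n - i

def parseStringHelper_alt (st : String) (parsed_st : String) : String :=
  PySem.Str.join "" (parseStringHelperAltGo st.toList st.toList.length 0 [parsed_st])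

-- ===== PRECONDITION & SPEC =====
def Spec_parseStringHelper (st : String) (parsed_st : String) (out : String) : Prop := out = parseStringHelper_alt st parsed_st
instance (st : String) (parsed_st : String) (out : String) : Decidable (Spec_parseStringHelper st parsed_st out) := by unfold Spec_parseStringHelper; infer_instance

-- ===== CLAIM (what is proved, stated in full; the proofs are below) =====
def Claim_equal_parseStringHelper : Prop := ∀ (st : String) (parsed_st : String), Dom_parseStringHelper st parsed_st → Spec_parseStringHelper st parsed_st (parseStringHelper st parsed_st)

-- ===== LEMMAS AND PROOFS =====

-- canonical result of one scan over a character list (pvQuote handles what follows a "'")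
mutual
def pvCore : List Char → List Char
  | [] => []
  | c :: rest =>
    if PySem.Chars.isalpha c then c :: pvCore rest
    else if c = '\'' then pvQuote rest
    else ' ' :: pvCore rest

def pvQuote : List Char → List Char
  | [] => [' ']
  | d :: rest2 =>
    (if d = 's' then [' ', ' ']
     else if PySem.Chars.isalpha d then ['\'', d]
     else [' ', ' ']) ++ pvCore rest2
end

theorem pvJoinNil (p : List (List Char)) : PySem.Chars.join [] p = p.flatten := by
  simp only [PySem.Chars.join, List.intercalate]
  induction p with
  | nil => simp
  | cons x xs ih =>
    cases xs with
    | nil => simp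
    | cons y ys => simp_all [List.intersperse]

theorem pvJoinToList (parts : List String) :
    (PySem.Str.join "" parts).toList = (parts.map String.toList).flatten := by
  rw [PySem.Str.toList_join]
  have h : ("" : String).toList = [] := rfl
  rw [h, pvJoinNil]

theorem pvAposNotAlpha : PySem.Chars.isalpha '\'' = false := by decide

theorem parseStringHelperAux_eq (l p : List Char) :
    parseStringHelperAux l p = p ++ pvCore l := by
  induction l, p using parseStringHelperAux.induct with
  | case1 parsed => rw [parseStringHelperAux.eq_def]; simp [pvCore]
  | case2 c rest parsed h ih =>
    rw [parseStringHelperAux.eq_def]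
    simp [h, ih, pvCore]
  | case3 c parsed h d rest2 h2 ih =>
    obtain ⟨hq, -⟩ := h2
    subst hq
    rw [parseStringHelperAux.eq_def]
    by_cases hs : d = 's'
    · subst hs
      simp only [pvAposNotAlpha] at ih ⊢
      simpa [pvCore, pvQuote] using ih
    · by_cases hb : PySem.Chars.isalpha d
      · simp only [hs, hb] at ih ⊢
        simpa [pvCore, pvQuote, pvAposNotAlpha, hs, hb] using ih
      · simp only [hs, hb] at ih ⊢
        simpa [pvCore, pvQuote, pvAposNotAlpha, hs, hb] using ih
  | case4 c parsed h h2 ih => exact absurd h2.2 (by simp)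
  | case5 c rest parsed h h2 ih =>
    rw [parseStringHelperAux.eq_def]
    by_cases hq : c = '\''
    · have hrest : rest = [] := by
        by_contra hne
        exact h2 ⟨hq, hne⟩
      subst hrest hq
      simp [h, ih, pvCore, pvQuote]
    · simp [h, hq, ih, pvCore]

theorem parseStringHelperAltGo_eq (cs : List Char) (k : Nat) :
    ∀ i parts, cs.length - i ≤ k →
      ((parseStringHelperAltGo cs cs.length i parts).map String.toList).flatten
        = (parts.map String.toList).flatten ++ pvCore (cs.drop i) := by
  induction k with
  | zero =>
    intro i parts hk
    have h : ¬ i < cs.length := by omega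
    have hdrop : cs.drop i = [] := List.drop_eq_nil_of_le (by omega)
    rw [parseStringHelperAltGo]
    simp [h, hdrop, pvCore]
  | succ k ih =>
    intro i parts hk
    by_cases h : i < cs.length
    · have hdrop : cs.drop i = cs[i] :: cs.drop (i + 1) := List.drop_eq_getElem_cons h
      have hget : cs.getD i ' ' = cs[i] := List.getD_eq_getElem cs ' ' h
      rw [parseStringHelperAltGo]
      simp only [h, dif_pos, hget]
      by_cases ha : PySem.Chars.isalpha cs[i]
      · rw [if_pos ha, ih (i + 1) _ (by omega), hdrop]
        simp [pvCore, ha]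
      · rw [if_neg ha]
        by_cases hq : cs[i] = '\''
        · by_cases h2 : i + 1 < cs.length
          · have hget2 : cs.getD (i + 1) ' ' = cs[i + 1] := List.getD_eq_getElem cs ' ' h2
            have hdrop2 : cs.drop (i + 1) = cs[i + 1] :: cs.drop (i + 2) :=
              List.drop_eq_getElem_cons h2
            rw [if_pos ⟨hq, h2⟩, hget2, ih (i + 2) _ (by omega), hdrop, hdrop2]
            simp only [pvCore, pvQuote, hq, List.map_append, List.flatten_append]
            by_cases hs : cs[i + 1] = 's'
            · simp [hs, pvAposNotAlpha]
            · by_cases hb : PySem.Chars.isalpha cs[i + 1] <;> simp [hs, hb, pvAposNotAlpha]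
          · have hnil : cs.drop (i + 1) = [] := List.drop_eq_nil_of_le (by omega)
            rw [if_neg (by intro hc; exact h2 hc.2), ih (i + 1) _ (by omega), hdrop, hnil]
            simp [pvCore, pvQuote, pvAposNotAlpha, hq]
        · rw [if_neg (by intro hc; exact hq hc.1), ih (i + 1) _ (by omega), hdrop]
          simp [pvCore, ha, hq]
    · have hdrop : cs.drop i = [] := List.drop_eq_nil_of_le (by omega)
      rw [parseStringHelperAltGo]
      simp [h, hdrop, pvCore]

-- ===== VERDICT (by name: the statement is the Claim_ definition above) =====
theorem parseStringHelper_spec : Claim_equal_parseStringHelper := by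
  intro st parsed_st _
  unfold Spec_parseStringHelper parseStringHelper parseStringHelper_alt
  rw [← String.toList_inj, pvJoinToList,
    parseStringHelperAltGo_eq st.toList (st.toList.length) 0 [parsed_st] (by omega)]
  simp [parseStringHelperAux_eq]
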